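-- pv_equiv track=rewrite | github.com/tobiasherp/thebops | thebops/plustr1.py | freezeText
-- ===== SOURCE A (Python) =====
-- def freezeText(text, plural):
--     """
--     return a 'frozen' version of the given text, resolving the
--     '{[sing|]plu}' expressions, depending on the 2nd parameter, which
--     must be 'true' for plural versions and 'false' for singular.
--     Used by --> counted(key, text) (thebops.counters module)
--
--     Examples:
--
--     >>> num = 1
--     >>> freezeText('file[s] or director[y|ies]', num!=1)
--     'file or directory'
--     >>> num = 2
--     >>> freezeText('file[s] or director[y|ies]', num!=1)
--     'files or directories'
--     """
--     res, sing, plu, suffix = _splitPluralSwitchableString(text)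
--     if plural:
--         res = res + plu
--         while suffix:
--             prefix, sing, plu, suffix = _splitPluralSwitchableString(suffix)
--             res = ''.join((res, prefix, plu))
--     else:
--         res = res + sing
--         while suffix:
--             prefix, sing, plu, suffix = _splitPluralSwitchableString(suffix)
--             res = ''.join((res, prefix, sing))
--     return res
--
-- def _splitPluralSwitchableString(text):
--     """
--     split a string and return a 4-tuple:
--     (prefix, singular, plural, suffix)
--
--     >>> _splitPluralSwitchableString('file[s]')
--     ('file', '', 's', '')
--     >>> _splitPluralSwitchableString('stor[y|ies] ')
--     ('stor', 'y', 'ies', ' ')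
--
--     This is a helper function, used by --> freezeText(text, plural)
--     """
--     sf, pf = (0, 0)
--     tup1 = text.split('[', 1)
--     if len(tup1) == 1:
--         return (text, '', '', '')
--     tup2 = tup1[1].split(']', 1)
--     if len(tup2) == 1:
--         return (text, '', '', '')
--     tup3 = tup2[0].split('|', 1)
--     if len(tup3) == 1:
--         return (tup1[0], '', tup3[0], tup2[1])
--     else:
--         return (tup1[0], tup3[0], tup3[1], tup2[1])
-- ===== SOURCE B (Python) =====
-- import re
--
-- def freezeText(text, plural):
--     def repl(m):
--         parts = m.group(1).split('|', 1)
--         sing, plu = ('', parts[0]) if len(parts) == 1 else parts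
--         return plu if plural else sing
--     return re.sub(r'\[([^\]]*)\]', repl, text)
-- ===== Notes on version B (the rewrite author's own statement) =====
-- stated objective: idiomatic
-- what changed: Replaced the manual repeated split('[')/split(']') parse with an explicit accumulator loop over the suffix by a single regex substitution re.sub(r'\[([^\]]*)\]', repl, text) with a callback choosing the singular or plural part.
import Mathlib
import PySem

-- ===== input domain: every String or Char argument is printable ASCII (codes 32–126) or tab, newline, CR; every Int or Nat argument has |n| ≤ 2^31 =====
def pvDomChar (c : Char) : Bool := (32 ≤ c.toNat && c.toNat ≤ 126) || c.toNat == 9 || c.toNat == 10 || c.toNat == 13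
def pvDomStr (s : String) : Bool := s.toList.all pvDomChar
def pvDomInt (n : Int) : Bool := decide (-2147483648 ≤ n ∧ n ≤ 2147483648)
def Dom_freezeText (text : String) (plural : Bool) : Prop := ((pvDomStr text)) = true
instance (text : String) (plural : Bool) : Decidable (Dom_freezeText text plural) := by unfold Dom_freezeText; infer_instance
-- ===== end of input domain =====

-- B replaces A's manual repeated split/suffix loop by one regex-style substitution pass (idiomatic, same cost).

-- shared primitive: Python's s.split(sep, 1), as 'none' (separator absent) or 'some (before, after)'
def pySplitOnce (sep : Char) : List Char → Option (List Char × List Char)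
  | [] => none
  | c :: rest =>
    if c = sep then some ([], rest)
    else
      match pySplitOnce sep rest with
      | none => none
      | some (a, b) => some (c :: a, b)

-- ===== PORT A =====
-- _splitPluralSwitchableString(text): (prefix, singular, plural, suffix)
def splitPList (t : List Char) : List Char × List Char × List Char × List Char :=
  match pySplitOnce '[' t with
  | none => (t, [], [], [])
  | some (p, rest1) =>
    match pySplitOnce ']' rest1 with
    | none => (t, [], [], [])
    | some (content, suffix) =>
      match pySplitOnce '|' content with
      | none => (p, [], content, suffix)
      | some (s, pl) => (p, s, pl, suffix)

-- the 'while suffix:' loop of A; fuel is only a totality guard (suffix shrinks each iteration)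
def freezeLoop (plural : Bool) : Nat → List Char → List Char → List Char
  | 0, res, _ => res
  | Nat.succ f, res, suffix =>
    if suffix = [] then res
    else
      match splitPList suffix with
      | (pre, sing, plu, suf) =>
        freezeLoop plural f (res ++ pre ++ (if plural then plu else sing)) suf

def freezeText (text : String) (plural : Bool) : String :=
  match splitPList text.toList with
  | (res0, sing, plu, suffix) =>
    String.mk (freezeLoop plural (suffix.length + 1) (res0 ++ (if plural then plu else sing)) suffix)

-- ===== PORT B =====
-- the callback repl(m): split the bracket content at the first '|', pick by the flag
def bRepl (plural : Bool) (content : List Char) : List Char :=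
  match pySplitOnce '|' content with
  | none => if plural then content else []
  | some (s, p) => if plural then p else s

theorem pySplitOnce_len (sep : Char) :
    ∀ (l a b : List Char), pySplitOnce sep l = some (a, b) → b.length < l.length := by
  intro l
  induction l with
  | nil => intro a b h; simp [pySplitOnce] at h
  | cons c rest ih =>
    intro a b h
    by_cases hc : c = sep
    · simp [pySplitOnce, hc] at h
      simp [← h.2]
    · simp only [pySplitOnce, if_neg hc] at h
      cases hr : pySplitOnce sep rest with
      | none => rw [hr] at h; simp at h
      | some p =>
        obtain ⟨a', b'⟩ := p
        rw [hr] at h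
        simp at h
        have := ih a' b' hr
        simp [← h.2]
        omega

-- the single re.sub pass: scan left to right, on '[' look for the matching ']' (content = the
-- regex's [^\]]* group), substitute via the callback, and continue after the match
def freezeGo (plural : Bool) : List Char → List Char
  | [] => []
  | c :: rest =>
    if c = '[' then
      match h : pySplitOnce ']' rest with
      | none => c :: rest
      | some (content, after) => bRepl plural content ++ freezeGo plural after
    else c :: freezeGo plural rest
termination_by l => l.length
decreasing_by
  · exact Nat.lt_succ_of_lt (pySplitOnce_len ']' rest content after h)
  · simp

def freezeText_alt (text : String) (plural : Bool) : String :=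
  String.mk (freezeGo plural text.toList)

-- ===== PRECONDITION & SPEC =====
def Spec_freezeText (text : String) (plural : Bool) (out : String) : Prop := out = freezeText_alt text plural
instance (text : String) (plural : Bool) (out : String) : Decidable (Spec_freezeText text plural out) := by unfold Spec_freezeText; infer_instance

-- ===== CLAIM (what is proved, stated in full; the proofs are below) =====
def Claim_equal_freezeText : Prop := ∀ (text : String) (plural : Bool), Dom_freezeText text plural → Spec_freezeText text plural (freezeText text plural)

-- ===== LEMMAS AND PROOFS =====

theorem pySplitOnce_none (sep : Char) :
    ∀ (l : List Char), pySplitOnce sep l = none → sep ∉ l := by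
  intro l
  induction l with
  | nil => simp
  | cons c rest ih =>
    intro h
    by_cases hc : c = sep
    · simp [pySplitOnce, hc] at h
    · simp only [pySplitOnce, if_neg hc] at h
      cases hr : pySplitOnce sep rest with
      | none => simp [List.mem_cons, Ne.symm hc]; exact fun hm => ih hr hm
      | some p => rw [hr] at h; simp at h

theorem pySplitOnce_some (sep : Char) :
    ∀ (l a b : List Char), pySplitOnce sep l = some (a, b) → l = a ++ sep :: b ∧ sep ∉ a := by
  intro l
  induction l with
  | nil => intro a b h; simp [pySplitOnce] at h
  | cons c rest ih =>
    intro a b h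
    by_cases hc : c = sep
    · simp [pySplitOnce, hc] at h
      obtain ⟨ha, hb⟩ := h
      subst ha; subst hb
      simp [hc]
    · simp only [pySplitOnce, if_neg hc] at h
      cases hr : pySplitOnce sep rest with
      | none => rw [hr] at h; simp at h
      | some p =>
        obtain ⟨a', b'⟩ := p
        rw [hr] at h
        simp at h
        obtain ⟨hrest, hsep⟩ := ih a' b' hr
        constructor
        · simp [← h.1, ← h.2, hrest]
        · simp [← h.1, List.mem_cons, Ne.symm hc]
          exact fun hm => hsep hm

theorem fg_nolb (plural : Bool) :
    ∀ (l : List Char), '[' ∉ l → freezeGo plural l = l := by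
  intro l
  induction l with
  | nil => simp [freezeGo]
  | cons c rest ih =>
    intro h
    simp at h
    rw [freezeGo, if_neg (Ne.symm h.1), ih h.2]

theorem fg_prefix (plural : Bool) :
    ∀ (p t : List Char), '[' ∉ p → freezeGo plural (p ++ t) = p ++ freezeGo plural t := by
  intro p
  induction p with
  | nil => simp
  | cons c rest ih =>
    intro t h
    simp at h
    rw [List.cons_append, freezeGo, if_neg (Ne.symm h.1), ih t h.2]
    simp

theorem splitP_len :
    ∀ (l p s pl suf : List Char), splitPList l = (p, s, pl, suf) → l ≠ [] → suf.length < l.length := by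
  intro l p s pl suf h hne
  unfold splitPList at h
  cases h1 : pySplitOnce '[' l with
  | none =>
    rw [h1] at h
    simp at h
    rw [h.2.2.2]
    simpa [List.length_pos_iff] using hne
  | some pr =>
    obtain ⟨p0, rest1⟩ := pr
    rw [h1] at h
    dsimp only at h
    cases h2 : pySplitOnce ']' rest1 with
    | none =>
      rw [h2] at h
      simp at h
      rw [h.2.2.2]
      simpa [List.length_pos_iff] using hne
    | some pr2 =>
      obtain ⟨content, suffix⟩ := pr2
      rw [h2] at h
      dsimp only at h
      have hl1 := (pySplitOnce_some '[' l p0 rest1 h1).1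
      have hl2 := (pySplitOnce_some ']' rest1 content suffix h2).1
      have hsuf : suf = suffix := by
        cases h3 : pySplitOnce '|' content with
        | none => rw [h3] at h; simp at h; exact h.2.2.2.symm
        | some pr3 => obtain ⟨a, b⟩ := pr3; rw [h3] at h; simp at h; exact h.2.2.2.symm
      subst hsuf
      subst hl1; subst hl2
      simp
      omega

theorem freezeGo_lb_none (plural : Bool) (rest : List Char)
    (h : pySplitOnce ']' rest = none) :
    freezeGo plural ('[' :: rest) = '[' :: rest := by
  rw [freezeGo, if_pos rfl]
  split
  · rfl
  · rename_i content after heq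
    rw [h] at heq
    cases heq

theorem freezeGo_lb_some (plural : Bool) (rest content after : List Char)
    (h : pySplitOnce ']' rest = some (content, after)) :
    freezeGo plural ('[' :: rest) = bRepl plural content ++ freezeGo plural after := by
  rw [freezeGo, if_pos rfl]
  split
  · rename_i heq
    rw [h] at heq
    cases heq
  · rename_i content' after' heq
    rw [h] at heq
    cases heq
    rfl

theorem splitP_freezeGo (plural : Bool) (l p s pl suf : List Char)
    (hsp : splitPList l = (p, s, pl, suf)) :
    p ++ (if plural then pl else s) ++ freezeGo plural suf = freezeGo plural l := by
  unfold splitPList at hsp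
  cases h1 : pySplitOnce '[' l with
  | none =>
    rw [h1] at hsp
    simp at hsp
    obtain ⟨e1, e2, e3, e4⟩ := hsp
    subst e1; subst e2; subst e3; subst e4
    have hnl := pySplitOnce_none '[' l h1
    simp [freezeGo, fg_nolb plural l hnl]
  | some pr =>
    obtain ⟨p0, rest1⟩ := pr
    rw [h1] at hsp
    dsimp only at hsp
    obtain ⟨hl, hp0⟩ := pySplitOnce_some '[' l p0 rest1 h1
    cases h2 : pySplitOnce ']' rest1 with
    | none =>
      rw [h2] at hsp
      simp at hsp
      obtain ⟨e1, e2, e3, e4⟩ := hsp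
      subst e1; subst e2; subst e3; subst e4
      rw [hl, fg_prefix plural p0 _ hp0, freezeGo_lb_none plural rest1 h2]
      simp [freezeGo]
    | some pr2 =>
      obtain ⟨content, suffix⟩ := pr2
      rw [h2] at hsp
      dsimp only at hsp
      cases h3 : pySplitOnce '|' content with
      | none =>
        rw [h3] at hsp
        simp at hsp
        obtain ⟨e1, e2, e3, e4⟩ := hsp
        subst e1; subst e2; subst e3; subst e4
        rw [hl, fg_prefix plural p0 _ hp0, freezeGo_lb_some plural rest1 content suffix h2]
        simp [bRepl, h3]
      | some pr3 =>
        obtain ⟨a, b⟩ := pr3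
        rw [h3] at hsp
        simp at hsp
        obtain ⟨e1, e2, e3, e4⟩ := hsp
        subst e1; subst e2; subst e3; subst e4
        rw [hl, fg_prefix plural p0 _ hp0, freezeGo_lb_some plural rest1 content suffix h2]
        simp [bRepl, h3]

theorem freezeLoop_eq (plural : Bool) :
    ∀ (fuel : Nat) (suffix res : List Char), suffix.length < fuel →
      freezeLoop plural fuel res suffix = res ++ freezeGo plural suffix := by
  intro fuel
  induction fuel with
  | zero => intro suffix res h; omega
  | succ f ih =>
    intro suffix res h
    by_cases hs : suffix = []
    · subst hs; simp [freezeLoop, freezeGo]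
    · rw [freezeLoop, if_neg hs]
      cases hsp : splitPList suffix with
      | mk p rest =>
        obtain ⟨s, pl, suf⟩ := rest
        have hlen := splitP_len suffix p s pl suf hsp hs
        dsimp only
        rw [ih suf _ (by omega)]
        rw [← splitP_freezeGo plural suffix p s pl suf hsp]
        simp

theorem freezeText_eq (text : String) (plural : Bool) :
    freezeText text plural = freezeText_alt text plural := by
  unfold freezeText freezeText_alt
  cases hsp : splitPList text.toList with
  | mk p rest =>
    obtain ⟨s, pl, suf⟩ := rest
    dsimp only
    rw [freezeLoop_eq plural (suf.length + 1) suf _ (by omega)]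
    rw [← splitP_freezeGo plural text.toList p s pl suf hsp]

-- ===== VERDICT (by name: the statement is the Claim_ definition above) =====
theorem freezeText_spec : Claim_equal_freezeText := by
  intro text plural _
  unfold Spec_freezeText
  exact freezeText_eq text plural
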